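-- pv_equiv track=rewrite | github.com/amiroo54/DPM | src/DPM_Functions.py | parse_shortcut_string
-- ===== SOURCE A (Python) =====
-- def parse_shortcut_string(s):
--     if not s: return None, False, False, False
--     parts = s.upper().split("+")
--     ctrl = "CTRL" in parts or "CONTROL" in parts
--     alt = "ALT" in parts
--     shift = "SHIFT" in parts
--     tokens = [p for p in parts if p not in ("CTRL", "CONTROL", "ALT", "SHIFT")]
--     if not tokens: return None, ctrl, alt, shift
--     key = tokens[-1]
--     return key, ctrl, alt, shift
-- ===== SOURCE B (Python) =====
-- def parse_shortcut_string(s):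
--     if not s: return None, False, False, False
--     key = None
--     ctrl = alt = shift = False
--     for p in s.upper().split("+"):
--         if p in ("CTRL", "CONTROL"):
--             ctrl = True
--         elif p == "ALT":
--             alt = True
--         elif p == "SHIFT":
--             shift = True
--         else:
--             key = p
--     return key, ctrl, alt, shift
-- ===== Notes on version B (the rewrite author's own statement) =====
-- stated objective: simpler
-- what changed: Replaces the four separate scans over parts (two membership tests for ctrl, one each for alt/shift, plus a filter comprehension and tail indexing for the key) with a single accumulating pass over the tokens.
import Mathlib
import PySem

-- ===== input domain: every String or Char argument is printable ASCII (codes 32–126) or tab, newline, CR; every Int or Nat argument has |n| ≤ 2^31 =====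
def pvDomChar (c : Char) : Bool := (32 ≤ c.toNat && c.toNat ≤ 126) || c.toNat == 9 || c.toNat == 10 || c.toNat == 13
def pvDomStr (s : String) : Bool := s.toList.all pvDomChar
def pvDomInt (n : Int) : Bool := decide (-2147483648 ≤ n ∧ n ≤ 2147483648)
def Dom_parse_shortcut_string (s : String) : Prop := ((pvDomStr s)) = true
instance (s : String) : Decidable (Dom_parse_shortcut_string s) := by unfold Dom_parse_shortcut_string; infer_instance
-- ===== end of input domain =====

-- B replaces A's five separate scans over the token list (two membership tests, two more,
-- a filter comprehension plus tail indexing) with one accumulating fold; same results.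

-- ===== PORT A =====
def parse_shortcut_string (s : String) : Option String × Bool × Bool × Bool :=
  if s = "" then (none, false, false, false) else
  let parts := (PySem.Str.split? (PySem.Str.upper s) "+").getD []
  let ctrl := parts.contains "CTRL" || parts.contains "CONTROL"
  let alt := parts.contains "ALT"
  let shift := parts.contains "SHIFT"
  let tokens := parts.filter (fun p => !(p == "CTRL" || p == "CONTROL" || p == "ALT" || p == "SHIFT"))
  if tokens = [] then (none, ctrl, alt, shift)
  else (PySem.List.pyGet? tokens (-1), ctrl, alt, shift)

-- ===== PORT B =====
def psAltStep (st : Option String × Bool × Bool × Bool) (p : String) :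
    Option String × Bool × Bool × Bool :=
  if p == "CTRL" || p == "CONTROL" then (st.1, true, st.2.2.1, st.2.2.2)
  else if p == "ALT" then (st.1, st.2.1, true, st.2.2.2)
  else if p == "SHIFT" then (st.1, st.2.1, st.2.2.1, true)
  else (some p, st.2.1, st.2.2.1, st.2.2.2)

def parse_shortcut_string_alt (s : String) : Option String × Bool × Bool × Bool :=
  if s = "" then (none, false, false, false) else
  ((PySem.Str.split? (PySem.Str.upper s) "+").getD []).foldl psAltStep (none, false, false, false)

-- ===== PRECONDITION & SPEC =====
def Spec_parse_shortcut_string (s : String) (out : Option String × Bool × Bool × Bool) : Prop := out = parse_shortcut_string_alt s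
instance (s : String) (out : Option String × Bool × Bool × Bool) : Decidable (Spec_parse_shortcut_string s out) := by unfold Spec_parse_shortcut_string; infer_instance

-- ===== CLAIM (what is proved, stated in full; the proofs are below) =====
def Claim_equal_parse_shortcut_string : Prop := ∀ (s : String), Dom_parse_shortcut_string s → Spec_parse_shortcut_string s (parse_shortcut_string s)

-- ===== LEMMAS AND PROOFS =====

/-- Python membership 'x in parts' as a Bool `any` scan. -/
theorem pvContAny (l : List String) (x : String) : decide (x ∈ l) = l.any (fun p => p == x) := by
  induction l with
  | nil => simp
  | cons a t ih =>
    by_cases hx : x = a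
    · simp [hx]
    · simp [List.mem_cons, hx, ← ih, Ne.symm hx]

/-- `any` of a disjunction splits into two scans. -/
theorem pvAnyOr (l : List String) (p q : String → Bool) :
    l.any (fun x => p x || q x) = (l.any p || l.any q) := by
  induction l with
  | nil => simp
  | cons a t ih => simp [ih]; ac_rfl

/-- Characterisation of B's fold from an arbitrary state. -/
theorem psAltStep_foldl (l : List String) (k : Option String) (c a sh : Bool) :
    l.foldl psAltStep (k, c, a, sh) =
      (((l.filter (fun p => !(p == "CTRL" || p == "CONTROL" || p == "ALT" || p == "SHIFT"))).getLast?.map some).getD k,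
       c || l.any (fun p => p == "CTRL" || p == "CONTROL"),
       a || l.any (fun p => p == "ALT"),
       sh || l.any (fun p => p == "SHIFT")) := by
  induction l generalizing k c a sh with
  | nil => simp
  | cons p rest ih =>
    simp only [List.foldl_cons, psAltStep, List.filter_cons, List.any_cons]
    by_cases h1 : p = "CTRL" <;> by_cases h2 : p = "CONTROL" <;>
      by_cases h3 : p = "ALT" <;> by_cases h4 : p = "SHIFT" <;>
      first
      | simp [h1, h2, h3, h4, beq_eq_false_iff_ne.mpr h1, beq_eq_false_iff_ne.mpr h2,
          beq_eq_false_iff_ne.mpr h3, beq_eq_false_iff_ne.mpr h4, ih, List.getLast?_cons,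
          Bool.or_assoc]
      | simp [h1, h2, h3, h4, ih, List.getLast?_cons, Bool.or_assoc]

-- ===== VERDICT (by name: the statement is the Claim_ definition above) =====
theorem parse_shortcut_string_spec : Claim_equal_parse_shortcut_string := by
  intro s _
  show parse_shortcut_string s = parse_shortcut_string_alt s
  unfold parse_shortcut_string parse_shortcut_string_alt
  by_cases hs : s = ""
  · simp [hs]
  · simp only [hs, if_false]
    rw [psAltStep_foldl]
    set parts := (PySem.Str.split? (PySem.Str.upper s) "+").getD [] with hp
    set tokens := parts.filter (fun p => !(p == "CTRL" || p == "CONTROL" || p == "ALT" || p == "SHIFT")) with ht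
    by_cases h : tokens = []
    · simp [h, pvContAny parts "CTRL", pvContAny parts "CONTROL", pvContAny parts "ALT",
        pvContAny parts "SHIFT", pvAnyOr]
    · have hg : PySem.List.pyGet? tokens (-1) = tokens.getLast? := PySem.List.pyGet?_neg_one tokens
      cases hxx : tokens.getLast? with
      | none => exact absurd (List.getLast?_eq_none_iff.mp hxx) h
      | some x =>
        simp [h, hg, hxx, pvContAny parts "CTRL", pvContAny parts "CONTROL", pvContAny parts "ALT",
          pvContAny parts "SHIFT", pvAnyOr]
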